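-- pv_equiv track=rewrite | github.com/firstgenius/Game_Skyscrapers | skyscrapers.py | left_to_right_check
-- ===== SOURCE A (Python) =====
-- def left_to_right_check(input_line: str, pivot: int):
--     """
--     Check row-wise visibility from left to right.
--     Return True if number of building from the left-most hint is visible looking to the right,
--     False otherwise.
--
--     input_line - representing board row.
--     pivot - number on the left-most hint of the input_line.
--
--     >>> left_to_right_check("412453*", 4)
--     True
--     >>> left_to_right_check("452453*", 5)
--     False
--     """
--     visibility = 1
--     highest = input_line[1]
--     for i in range(2,6,1):
--         if input_line[i] > highest:
--             visibility += 1
--             highest = input_line[i]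
--     return visibility == pivot
-- ===== SOURCE B (Python) =====
-- def left_to_right_check(input_line: str, pivot: int):
--     row = [input_line[i] for i in range(1, 6)]
--     return len({max(row[:i + 1]) for i in range(5)}) == pivot
-- ===== Notes on version B (the rewrite author's own statement) =====
-- stated objective: idiomatic
-- what changed: Replaces A's stateful running-max/counter scan with building the five relevant characters as a list, taking the maximum of every prefix slice, and comparing the number of distinct prefix maxima (a set comprehension) to the pivot.
import Mathlib
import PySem

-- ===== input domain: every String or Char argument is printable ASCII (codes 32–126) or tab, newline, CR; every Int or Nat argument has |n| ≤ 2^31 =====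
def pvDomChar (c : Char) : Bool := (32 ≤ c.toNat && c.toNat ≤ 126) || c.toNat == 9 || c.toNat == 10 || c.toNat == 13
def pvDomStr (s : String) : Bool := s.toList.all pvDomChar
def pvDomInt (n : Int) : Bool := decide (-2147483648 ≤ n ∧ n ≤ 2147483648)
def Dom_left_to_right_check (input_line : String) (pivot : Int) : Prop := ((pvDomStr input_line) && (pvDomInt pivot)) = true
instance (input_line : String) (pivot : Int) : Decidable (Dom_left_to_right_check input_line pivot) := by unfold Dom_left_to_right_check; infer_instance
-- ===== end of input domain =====

-- B replaces A's stateful running-max/counter scan by a prefix-maximum table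
-- (max of each prefix slice) whose number of distinct values is the visibility count (objective: idiomatic).

-- ===== PORT A =====
-- visibility = 1; highest = input_line[1]; for i in range(2,6): if input_line[i] > highest: visibility += 1; highest = input_line[i]
-- pyGetD is total; Pre_ restricts to len(input_line) >= 6, exactly where the Python indexing does not raise IndexError.
def left_to_right_check (input_line : String) (pivot : Int) : Bool :=
  let cs := input_line.toList
  let st := (PySem.List.pyRange 2 6 1).foldl
    (fun (st : Int × Char) i =>
      let c := PySem.List.pyGetD cs i ' '
      if st.2 < c then (st.1 + 1, c) else st)
    (1, PySem.List.pyGetD cs 1 ' ')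
  st.1 == pivot

-- ===== PORT B =====
-- row = [input_line[i] for i in range(1, 6)]; return len({max(row[:i+1]) for i in range(5)}) == pivot
def left_to_right_check_alt (input_line : String) (pivot : Int) : Bool :=
  let row := (PySem.List.pyRange 1 6 1).map
    (fun i => PySem.List.pyGetD input_line.toList i ' ')
  let maxes := (PySem.List.pyRange 0 5 1).map
    (fun i => (PySem.List.max? (PySem.List.slice row none (some (i + 1))) (fun x => x)).getD ' ')
  PySem.Set.len (PySem.Set.ofList maxes) == pivot

-- ===== PRECONDITION & SPEC =====
-- Pre_: the Python A indexes input_line[1]..input_line[5] and raises IndexError on strings shorter than 6.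
def Pre_left_to_right_check (input_line : String) (pivot : Int) : Prop :=
  6 ≤ PySem.Str.len input_line
instance (input_line : String) (pivot : Int) : Decidable (Pre_left_to_right_check input_line pivot) := by unfold Pre_left_to_right_check; infer_instance
def pvWitness_left_to_right_check : String × Int := ("412453*", 4)

def Spec_left_to_right_check (input_line : String) (pivot : Int) (out : Bool) : Prop := out = left_to_right_check_alt input_line pivot
instance (input_line : String) (pivot : Int) (out : Bool) : Decidable (Spec_left_to_right_check input_line pivot out) := by unfold Spec_left_to_right_check; infer_instance

-- ===== CLAIM (what is proved, stated in full; the proofs are below) =====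
def Claim_equal_left_to_right_check : Prop := ∀ (input_line : String) (pivot : Int), Dom_left_to_right_check input_line pivot → Pre_left_to_right_check input_line pivot → Spec_left_to_right_check input_line pivot (left_to_right_check input_line pivot)

-- ===== LEMMAS AND PROOFS =====

-- prefix maxima of a list, seeded with the running maximum h
def pmax (h : Char) : List Char → List Char
  | [] => []
  | x :: xs => max h x :: pmax (max h x) xs

-- invariant: inserting the prefix maxima into a set whose elements are all ≤ h (h present)
-- grows the set by exactly the number of strict increases counted by A's loop
theorem pmax_foldl_add_length (xs : List Char) :
    ∀ (h : Char) (s : PySem.Set Char) (v : Int),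
      (∀ y ∈ s, y ≤ h) → h ∈ s →
      ((List.foldl PySem.Set.add s (pmax h xs)).length : Int) - s.length
        = (xs.foldl (fun (st : Int × Char) x => if st.2 < x then (st.1 + 1, x) else st) (v, h)).1 - v := by
  induction xs with
  | nil => intro h s v _ _; simp [pmax]
  | cons x xs ih =>
    intro h s v hle hmem
    by_cases hx : h < x
    · have hxs : x ∉ s := fun hx' => absurd hx (not_lt.mpr (hle x hx'))
      have hadd : PySem.Set.add s x = s ++ [x] := by
        simp only [PySem.Set.add]
        simp [hxs]
      have hmax : max h x = x := max_eq_right hx.le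
      have hle' : ∀ y ∈ s ++ [x], y ≤ x := by
        intro y hy
        rcases List.mem_append.mp hy with hy | hy
        · exact (hle y hy).trans hx.le
        · simp at hy; simp [hy]
      have := ih x (s ++ [x]) (v + 1) hle' (by simp)
      simp only [pmax, hmax, List.foldl_cons, hadd, if_pos hx] at *
      simp only [List.length_append, List.length_cons, List.length_nil] at this ⊢
      omega
    · have hmax : max h x = h := max_eq_left (not_lt.mp hx)
      have := ih h s v hle hmem
      simp only [pmax, hmax, List.foldl_cons, if_neg hx]
      have hadd : PySem.Set.add s h = s := by
        simp only [PySem.Set.add]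
        simp [hmem]
      rw [hadd]
      exact this

-- the core equality, stated on the five characters both programs actually read
theorem core_eq (b c d e f : Char) (p : Int) :
    (([c, d, e, f].foldl (fun (st : Int × Char) x => if st.2 < x then (st.1 + 1, x) else st) (1, b)).1 == p)
      = (((PySem.Set.ofList (b :: pmax b [c, d, e, f])).length : Int) == p) := by
  have hset : PySem.Set.ofList (b :: pmax b [c, d, e, f])
      = List.foldl PySem.Set.add ([b] : PySem.Set Char) (pmax b [c, d, e, f]) := by
    simp [PySem.Set.ofList, PySem.Set.add, PySem.Set.empty]
  have hinv := pmax_foldl_add_length [c, d, e, f] b ([b] : PySem.Set Char) 1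
    (by intro y hy; simp at hy; simp [hy]) (by simp)
  rw [hset]
  have : ((List.foldl PySem.Set.add ([b] : PySem.Set Char) (pmax b [c, d, e, f])).length : Int)
      = ([c, d, e, f].foldl (fun (st : Int × Char) x => if st.2 < x then (st.1 + 1, x) else st) (1, b)).1 := by
    simp only [List.length_cons, List.length_nil] at hinv
    omega
  rw [this]

-- the list-level equivalence: both ports read characters 1..5 of the string
theorem ports_eq_of_cons (a b c d e f : Char) (r : List Char) (p : Int) (s : String)
    (hs : s.toList = a :: b :: c :: d :: e :: f :: r) :
    left_to_right_check s p = left_to_right_check_alt s p := by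
  have h25 : PySem.List.pyRange 2 6 1 = [2, 3, 4, 5] := by decide
  have h16 : PySem.List.pyRange 1 6 1 = [1, 2, 3, 4, 5] := by decide
  have h05 : PySem.List.pyRange 0 5 1 = [0, 1, 2, 3, 4] := by decide
  simp only [left_to_right_check, left_to_right_check_alt, hs, h25, h16, h05,
    List.map_cons, List.map_nil, List.foldl_cons, List.foldl_nil,
    PySem.List.pyGetD_ofNat', List.getD_cons_succ, List.getD_cons_zero]
  have hcore := core_eq b c d e f p
  simp only [List.foldl_cons, List.foldl_nil] at hcore
  rw [hcore]
  have e1 : PySem.List.slice [b, c, d, e, f] none (some 1) = [b] := rfl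
  have e2 : PySem.List.slice [b, c, d, e, f] none (some 2) = [b, c] := rfl
  have e3 : PySem.List.slice [b, c, d, e, f] none (some 3) = [b, c, d] := rfl
  have e4 : PySem.List.slice [b, c, d, e, f] none (some 4) = [b, c, d, e] := rfl
  have e5 : PySem.List.slice [b, c, d, e, f] none (some 5) = [b, c, d, e, f] := rfl
  norm_num [e1, e2, e3, e4, e5, PySem.List.max?_id_cons, PySem.Set.len, pmax,
    List.foldl_cons, List.foldl_nil]

-- ===== VERDICT (by name: the statement is the Claim_ definition above) =====
theorem left_to_right_check_spec : Claim_equal_left_to_right_check := by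
  intro s p _ hpre
  unfold Spec_left_to_right_check
  have hlen : 6 ≤ s.toList.length := by
    have := hpre
    unfold Pre_left_to_right_check at this
    rw [PySem.Str.len_eq] at this
    exact_mod_cast this
  match hs : s.toList with
  | a :: b :: c :: d :: e :: f :: r => exact ports_eq_of_cons a b c d e f r p s hs
  | [] | [_] | [_,_] | [_,_,_] | [_,_,_,_] | [_,_,_,_,_] => simp [hs] at hlen
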